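-- pv_equiv track=rewrite | github.com/cyrus925/activelearning92 | bestimages.py | select_worst_images
-- ===== SOURCE A (Python) =====
-- def select_worst_images(results, limit=100):
--     """
--     Sélectionne les pires images en priorisant celles sans prédictions.
--     """
--     worst_images = []
--     images_no_predictions = []
--
--     for image, scores in results.items():
--         if not scores:  # Aucune prédiction
--             images_no_predictions.append((image, 0))  # Score nul
--         else:
--             min_score = min(scores)  # Prendre le score minimum
--             worst_images.append((image, min_score))
--
--     # Trier les deux listes
--     images_no_predictions.sort(key=lambda x: x[1])  # Pas nécessaire ici mais garde un ordre cohérent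
--     worst_images.sort(key=lambda x: x[1])  # Trier par score croissant
--
--     # Prioriser les images sans prédictions
--     combined = images_no_predictions + worst_images
--     return combined[:limit]
-- ===== SOURCE B (Python) =====
-- import heapq
--
-- def select_worst_images(results, limit=100):
--     # Score each image exactly once: no-prediction images get key (0, 0),
--     # the rest (1, min(scores)); then a bounded-heap partial selection
--     # (heapq.nsmallest keeps only `limit` candidates) replaces the full sorts.
--     scored = [(image, min(scores), 1) if scores else (image, 0, 0)
--               for image, scores in results.items()]
--     picked = heapq.nsmallest(limit, scored, key=lambda t: (t[2], t[1]))
--     return [(image, score) for image, score, _flag in picked]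
-- ===== Notes on version B (the rewrite author's own statement) =====
-- stated objective: alternative
-- what changed: Replaces A's partition into two lists, two full sorts, concatenation and slice by scoring each image once into (image, score, flag) triples and running heapq.nsmallest, a bounded-heap partial selection keyed on (flag, score) that keeps only `limit` candidates.
-- intended difference: For negative limit with more than |limit| images, A's combined[:limit] silently drops the |limit| worst-scoring images and returns the rest (a Python slice artefact), while B returns [] — the intended reading of a non-positive limit on images to select. — e.g. on select_worst_images([("a", [1]), ("b", [])], -1): A returns [("b", 0)], B returns []
import Mathlib
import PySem

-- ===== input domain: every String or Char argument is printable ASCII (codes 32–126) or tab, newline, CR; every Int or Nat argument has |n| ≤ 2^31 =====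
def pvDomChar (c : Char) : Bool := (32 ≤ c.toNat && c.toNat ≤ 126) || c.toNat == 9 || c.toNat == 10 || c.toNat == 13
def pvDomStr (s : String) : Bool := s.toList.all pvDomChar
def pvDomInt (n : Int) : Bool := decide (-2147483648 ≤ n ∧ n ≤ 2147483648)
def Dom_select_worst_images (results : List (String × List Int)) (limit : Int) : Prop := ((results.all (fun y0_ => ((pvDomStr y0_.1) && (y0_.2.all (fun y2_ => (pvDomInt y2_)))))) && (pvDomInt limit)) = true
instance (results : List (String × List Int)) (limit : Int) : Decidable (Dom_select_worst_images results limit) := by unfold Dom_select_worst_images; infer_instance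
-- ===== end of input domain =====

-- B scores each image once and uses heapq.nsmallest (a bounded-heap partial
-- selection) instead of A's partition + two full sorts + concatenation + slice.

-- min(scores): PySem.List.min? (first minimum); both Pythons only call it on nonempty lists
def pvMin (scores : List Int) : Int := (PySem.List.min? scores (fun x => x)).getD 0

-- ===== PORT A =====
def select_worst_images (results : List (String × List Int)) (limit : Int) : List (String × Int) :=
  -- the for-loop building images_no_predictions (acc.1) and worst_images (acc.2)
  let acc := results.foldl
    (fun (acc : List (String × Int) × List (String × Int)) r =>
      if r.2 = [] then (acc.1 ++ [(r.1, 0)], acc.2)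
      else (acc.1, acc.2 ++ [(r.1, pvMin r.2)])) ([], [])
  let noPredS := PySem.List.sorted acc.1 (fun x => x.2) false
  let worstS := PySem.List.sorted acc.2 (fun x => x.2) false
  PySem.List.slice (noPredS ++ worstS) none (some limit)

-- ===== PORT B =====
def select_worst_images_alt (results : List (String × List Int)) (limit : Int) : List (String × Int) :=
  -- scored = [(image, min(scores), 1) if scores else (image, 0, 0) for image, scores in results.items()]
  let scored := results.map (fun r =>
    if r.2 = [] then (r.1, (0 : Int), (0 : Int)) else (r.1, pvMin r.2, (1 : Int)))
  -- heapq.nsmallest(limit, scored, key=lambda t: (t[2], t[1])), ported per its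
  -- documented semantics: the first `limit` items of the stable sort by that key
  -- (empty when limit ≤ 0, the whole sorted list when limit ≥ len)
  let picked := (PySem.List.sorted2 scored (fun t => t.2.2) (fun t => t.2.1) false).take limit.toNat
  -- [(image, score) for image, score, _flag in picked]
  picked.map (fun t => (t.1, t.2.1))

-- ===== PRECONDITION & SPEC =====
-- On limit < 0 with more than |limit| images, A's `combined[:limit]` silently drops the
-- |limit| WORST-scoring images and returns the rest — an artefact of Python slice
-- semantics; B returns [] there (no images requested), the intended reading of a
-- non-positive limit.
def D_select_worst_images (results : List (String × List Int)) (limit : Int) : Prop :=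
  limit < 0 ∧ 0 < (results.length : Int) + limit
instance (results : List (String × List Int)) (limit : Int) : Decidable (D_select_worst_images results limit) := by unfold D_select_worst_images; infer_instance

def Spec_select_worst_images (results : List (String × List Int)) (limit : Int) (out : List (String × Int)) : Prop := ¬ D_select_worst_images results limit → out = select_worst_images_alt results limit
instance (results : List (String × List Int)) (limit : Int) (out : List (String × Int)) : Decidable (Spec_select_worst_images results limit out) := by unfold Spec_select_worst_images; infer_instance

def pvDiffWitness_select_worst_images : (List (String × List Int)) × Int := ([("a", [1]), ("b", [])], -1)
def pvDiffWitnessOut_select_worst_images : (List (String × Int)) × (List (String × Int)) := ([("b", 0)], [])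

-- ===== CLAIM (what is proved, stated in full; the proofs are below) =====
def Claim_unchanged_select_worst_images : Prop := ∀ (results : List (String × List Int)) (limit : Int), Dom_select_worst_images results limit → Spec_select_worst_images results limit (select_worst_images results limit)
def Claim_changed_select_worst_images : Prop := Dom_select_worst_images (pvDiffWitness_select_worst_images.1) (pvDiffWitness_select_worst_images.2) ∧ D_select_worst_images (pvDiffWitness_select_worst_images.1) (pvDiffWitness_select_worst_images.2) ∧ select_worst_images (pvDiffWitness_select_worst_images.1) (pvDiffWitness_select_worst_images.2) = pvDiffWitnessOut_select_worst_images.1 ∧ select_worst_images_alt (pvDiffWitness_select_worst_images.1) (pvDiffWitness_select_worst_images.2) = pvDiffWitnessOut_select_worst_images.2 ∧ pvDiffWitnessOut_select_worst_images.1 ≠ pvDiffWitnessOut_select_worst_images.2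
def Claim_exact_select_worst_images : Prop := ∀ (results : List (String × List Int)) (limit : Int), Dom_select_worst_images results limit → D_select_worst_images results limit → select_worst_images results limit ≠ select_worst_images_alt results limit

-- ===== LEMMAS AND PROOFS =====

-- abbreviations used only by the proofs
def pvK2 (r : String × List Int) : Int := if r.2 = [] then 0 else pvMin r.2
def pvProj (r : String × List Int) : String × Int := (r.1, pvK2 r)
def pvG (r : String × List Int) : String × Int × Int :=
  if r.2 = [] then (r.1, (0 : Int), (0 : Int)) else (r.1, pvMin r.2, (1 : Int))
def pvProj3 (t : String × Int × Int) : String × Int := (t.1, t.2.1)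
def pvLex (a b : String × List Int) : Bool :=
  decide ((if a.2 = [] then (0 : Int) else 1) < (if b.2 = [] then (0 : Int) else 1)) ||
    (!decide ((if b.2 = [] then (0 : Int) else 1) < (if a.2 = [] then (0 : Int) else 1)) &&
      decide (pvK2 a < pvK2 b))
def pvLex3 (a b : String × Int × Int) : Bool :=
  decide (a.2.2 < b.2.2) || (!decide (b.2.2 < a.2.2) && decide (a.2.1 < b.2.1))
def pvK2b (a b : String × List Int) : Bool := decide (pvK2 a < pvK2 b)

theorem pv_insertBy_skip {α : Type} (b : α → α → Bool) (x : α) (l1 l2 : List α)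
    (h : ∀ y ∈ l1, b x y = false) :
    PySem.List.insertBy b x (l1 ++ l2) = l1 ++ PySem.List.insertBy b x l2 := by
  induction l1 with
  | nil => simp
  | cons y t ih =>
      simp only [List.cons_append, PySem.List.insertBy, h y (by simp)]
      simp only [Bool.false_eq_true, if_false, List.cons.injEq, true_and]
      exact ih (fun z hz => h z (by simp [hz]))

theorem pv_insertBy_front {α : Type} (b : α → α → Bool) (x : α) (l : List α)
    (h : ∀ y ∈ l, b x y = true) :
    PySem.List.insertBy b x l = x :: l := by
  cases l with
  | nil => rfl
  | cons y t => simp [PySem.List.insertBy, h y (by simp)]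

theorem pv_insertBy_congr {α : Type} (b b' : α → α → Bool) (x : α) (l : List α)
    (h : ∀ y ∈ l, b x y = b' x y) :
    PySem.List.insertBy b x l = PySem.List.insertBy b' x l := by
  induction l with
  | nil => rfl
  | cons y t ih =>
      simp only [PySem.List.insertBy, h y (by simp)]
      rw [ih (fun z hz => h z (by simp [hz]))]

theorem pv_map_insertBy {α β : Type} (f : α → β) (ba : α → α → Bool) (bb : β → β → Bool)
    (hb : ∀ p q, bb (f p) (f q) = ba p q) (x : α) (l : List α) :
    (PySem.List.insertBy ba x l).map f = PySem.List.insertBy bb (f x) (l.map f) := by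
  induction l with
  | nil => rfl
  | cons y t ih =>
      simp only [PySem.List.insertBy, List.map_cons, hb x y]
      by_cases h : ba x y = true
      · simp [h]
      · simp only [Bool.not_eq_true] at h
        simp [h, ih]

theorem pv_map_foldl_insertBy {α β : Type} (f : α → β) (ba : α → α → Bool) (bb : β → β → Bool)
    (hb : ∀ p q, bb (f p) (f q) = ba p q) (xs : List α) (acc : List α) :
    (xs.foldl (fun a x => PySem.List.insertBy ba x a) acc).map f =
      (xs.map f).foldl (fun a y => PySem.List.insertBy bb y a) (acc.map f) := by
  induction xs generalizing acc with
  | nil => rfl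
  | cons x t ih => simp only [List.foldl_cons, List.map_cons, ih, pv_map_insertBy f ba bb hb]

theorem pv_pairwise_zero (xs : List (String × Int)) (h : ∀ y ∈ xs, y.2 = 0) :
    List.Pairwise (fun a b : String × Int => a.2 ≤ b.2) xs := by
  induction xs with
  | nil => exact List.Pairwise.nil
  | cons y t ih =>
      refine List.Pairwise.cons (fun z hz => ?_) (ih (fun z hz => h z (by simp [hz])))
      rw [h y (by simp), h z (by simp [hz])]

-- A's loop builds the two partitions in iteration order
theorem pv_fold_partition (rs : List (String × List Int))
    (a b : List (String × Int)) :
    rs.foldl (fun (acc : List (String × Int) × List (String × Int)) r =>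
      if r.2 = [] then (acc.1 ++ [(r.1, 0)], acc.2)
      else (acc.1, acc.2 ++ [(r.1, pvMin r.2)])) (a, b) =
    (a ++ (rs.filter (fun r => decide (r.2 = []))).map pvProj,
     b ++ (rs.filter (fun r => !decide (r.2 = []))).map pvProj) := by
  induction rs generalizing a b with
  | nil => simp
  | cons r t ih =>
      by_cases h : r.2 = []
      · simp [h, ih, pvProj, pvK2]
      · simp [h, ih, pvProj, pvK2]

-- the central stability lemma: the single lexicographic insertion sort keeps all
-- no-prediction items (flag 0) in front in arrival order and insertion-sorts the rest by min-score
theorem pv_lex_split (rs : List (String × List Int)) (np w : List (String × List Int))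
    (hnp : ∀ y ∈ np, y.2 = ([] : List Int)) (hw : ∀ y ∈ w, y.2 ≠ ([] : List Int)) :
    rs.foldl (fun a x => PySem.List.insertBy pvLex x a) (np ++ w) =
      (np ++ rs.filter (fun r => decide (r.2 = []))) ++
        (rs.filter (fun r => !decide (r.2 = []))).foldl
          (fun a x => PySem.List.insertBy pvK2b x a) w := by
  induction rs generalizing np w with
  | nil => simp
  | cons r t ih =>
      by_cases h : r.2 = []
      · have hskip : ∀ y ∈ np, pvLex r y = false := by
          intro y hy
          simp [pvLex, h, hnp y hy, pvK2]
        have hfront : ∀ y ∈ w, pvLex r y = true := by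
          intro y hy
          simp [pvLex, h, hw y hy]
        have : PySem.List.insertBy pvLex r (np ++ w) = (np ++ [r]) ++ w := by
          rw [pv_insertBy_skip _ _ _ _ hskip, pv_insertBy_front _ _ _ hfront]
          simp
        simp only [List.foldl_cons, this]
        rw [ih (np ++ [r]) w (by intro y hy; rcases List.mem_append.1 hy with h1 | h1
                                 · exact hnp y h1
                                 · simp at h1; rw [h1, h]) hw]
        simp [h]
      · have hskip : ∀ y ∈ np, pvLex r y = false := by
          intro y hy
          simp [pvLex, h, hnp y hy, pvK2]
        have hcongr : ∀ y ∈ w, pvLex r y = pvK2b r y := by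
          intro y hy
          simp [pvLex, pvK2b, h, hw y hy]
        have : PySem.List.insertBy pvLex r (np ++ w) =
            np ++ PySem.List.insertBy pvK2b r w := by
          rw [pv_insertBy_skip _ _ _ _ hskip, pv_insertBy_congr _ _ _ _ hcongr]
        simp only [List.foldl_cons, this]
        rw [ih np (PySem.List.insertBy pvK2b r w) hnp
            (by intro y hy
                rcases (PySem.List.mem_insertBy _ _ _ _).1 hy with h1 | h1
                · rw [h1]; exact h
                · exact hw y h1)]
        simp [h]

-- B's pre-take list (the sorted scored triples, projected) IS A's pre-slice list
theorem pv_lists_eq (results : List (String × List Int)) :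
    (PySem.List.sorted2 (results.map pvG) (fun t => t.2.2) (fun t => t.2.1) false).map pvProj3 =
      PySem.List.sorted ((results.filter (fun r => decide (r.2 = []))).map pvProj) (fun x => x.2) false ++
      PySem.List.sorted ((results.filter (fun r => !decide (r.2 = []))).map pvProj) (fun x => x.2) false := by
  have hB : PySem.List.sorted2 (results.map pvG) (fun t => t.2.2) (fun t => t.2.1) false =
      (results.map pvG).foldl (fun a x => PySem.List.insertBy pvLex3 x a) [] := rfl
  have hmap : (results.foldl (fun a x => PySem.List.insertBy pvLex x a) []).map pvG =
      (results.map pvG).foldl (fun a x => PySem.List.insertBy pvLex3 x a) [] := by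
    have := pv_map_foldl_insertBy pvG pvLex pvLex3
      (by intro p q
          by_cases hp : p.2 = [] <;> by_cases hq : q.2 = [] <;>
            simp [pvG, pvLex, pvLex3, pvK2, hp, hq]) results []
    simpa using this
  have hsplit := pv_lex_split results [] [] (by simp) (by simp)
  simp only [List.nil_append] at hsplit
  have hpp : ∀ r : String × List Int, pvProj3 (pvG r) = pvProj r := by
    intro r
    by_cases h : r.2 = [] <;> simp [pvG, pvProj3, pvProj, pvK2, h]
  have hcomp : ∀ l : List (String × List Int), (l.map pvG).map pvProj3 = l.map pvProj := by
    intro l; rw [List.map_map]; exact List.map_congr_left (fun r _ => hpp r)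
  rw [hB, ← hmap, hsplit, List.map_append, List.map_append, hcomp, hcomp]
  -- no-prediction half: sorting by the (all-zero) score is the identity
  have hnp : PySem.List.sorted
      ((results.filter (fun r => decide (r.2 = []))).map pvProj) (fun x => x.2) false =
      (results.filter (fun r => decide (r.2 = []))).map pvProj := by
    apply PySem.List.sorted_eq_self_of_pairwise
    apply pv_pairwise_zero
    intro y hy
    rcases List.mem_map.1 hy with ⟨r, hr, hry⟩
    have : r.2 = [] := by simpa using (List.mem_filter.1 hr).2
    rw [← hry]; simp [pvProj, pvK2, this]
  -- with-prediction half: sorting the projections = projecting the k2-insertion sort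
  have hw : PySem.List.sorted
      ((results.filter (fun r => !decide (r.2 = []))).map pvProj) (fun x => x.2) false =
      ((results.filter (fun r => !decide (r.2 = []))).foldl
        (fun a x => PySem.List.insertBy pvK2b x a) []).map pvProj := by
    have := pv_map_foldl_insertBy pvProj pvK2b
      (fun a b : String × Int => decide (a.2 < b.2))
      (by intro p q; simp [pvK2b, pvProj]) (results.filter (fun r => !decide (r.2 = []))) []
    rw [this]; rfl
  rw [hnp, hw]

-- the pre-slice/pre-take list has one entry per image
theorem pv_len (results : List (String × List Int)) :
    ((PySem.List.sorted2 (results.map pvG) (fun t => t.2.2) (fun t => t.2.1) false).map pvProj3).length =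
      results.length := by
  rw [List.length_map,
    (PySem.List.sorted2_perm (results.map pvG) (fun t => t.2.2) (fun t => t.2.1) false).length_eq,
    List.length_map]

-- both ports, rewritten to the common list
theorem pv_A_eq (results : List (String × List Int)) (limit : Int) :
    select_worst_images results limit =
      PySem.List.slice
        ((PySem.List.sorted2 (results.map pvG) (fun t => t.2.2) (fun t => t.2.1) false).map pvProj3)
        none (some limit) := by
  unfold select_worst_images
  rw [pv_fold_partition]
  simp only [List.nil_append]
  rw [pv_lists_eq]

theorem pv_B_eq (results : List (String × List Int)) (limit : Int) :
    select_worst_images_alt results limit =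
      ((PySem.List.sorted2 (results.map pvG) (fun t => t.2.2) (fun t => t.2.1) false).map pvProj3).take
        limit.toNat := by
  unfold select_worst_images_alt
  simp only [← List.map_take]
  rfl

-- ===== VERDICT (by name: the statements are the Claim_ definitions above) =====
theorem select_worst_images_spec : Claim_unchanged_select_worst_images := by
  intro results limit _ hnd
  show select_worst_images results limit = select_worst_images_alt results limit
  rw [pv_A_eq, pv_B_eq]
  set L := (PySem.List.sorted2 (results.map pvG) (fun t => t.2.2) (fun t => t.2.1) false).map pvProj3 with hL
  unfold D_select_worst_images at hnd
  rcases Int.lt_or_le limit 0 with hneg | hpos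
  · have hk : limit = -((-limit).toNat : Int) := by omega
    have hk0 : 0 < (-limit).toNat := by omega
    rw [hk, PySem.List.slice_to_neg_natCast _ _ hk0]
    have hlen : (L.length : Int) = (results.length : Int) := by rw [hL, pv_len]
    have h1 : L.length - (-limit).toNat = 0 := by omega
    have h2 : ((-((-limit).toNat : Int))).toNat = 0 := by omega
    rw [h1, h2]
  · rw [← Int.toNat_of_nonneg hpos, PySem.List.slice_to_natCast]; simp; omega

theorem select_worst_images_changed : Claim_changed_select_worst_images := by
  unfold Claim_changed_select_worst_images; decide

theorem select_worst_images_tight : Claim_exact_select_worst_images := by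
  intro results limit _ hd
  unfold D_select_worst_images at hd
  rw [pv_A_eq, pv_B_eq]
  set L := (PySem.List.sorted2 (results.map pvG) (fun t => t.2.2) (fun t => t.2.1) false).map pvProj3 with hL
  have hlen : (L.length : Int) = (results.length : Int) := by rw [hL, pv_len]
  have hk : limit = -((-limit).toNat : Int) := by omega
  have hk0 : 0 < (-limit).toNat := by omega
  rw [hk, PySem.List.slice_to_neg_natCast _ _ hk0]
  have h2 : ((-((-limit).toNat : Int))).toNat = 0 := by omega
  rw [h2, List.take_zero]
  intro hcontra
  rcases List.take_eq_nil_iff.1 hcontra with h | h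
  · omega
  · have : L.length = 0 := by rw [h]; rfl
    omega
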